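-- pv_equiv track=rewrite | github.com/wuch9920061/BridgeFuncRecovery | utilities_FunRec.py | formalize_CountDamagedQty
-- ===== SOURCE A (Python) =====
-- from collections import Counter
--
-- def formalize_CountDamagedQty(CompName_List_input,DamageSample_Comp_Qty_input):
--     ##---- Convert 'DamageSample_Comp_Qty' (sampled scattered DS per qty, per rlz) into a count dict 'CountDamagedQty' (per rlz, per DS )
--     CountDamagedQty = {CompName1: None for CompName1 in CompName_List_input}
--
--     for CompName1 in CountDamagedQty.keys():
--         DamageSample_perqty_this = DamageSample_Comp_Qty_input[CompName1]
--         DamageSample_perrlz_this = list(zip(*DamageSample_perqty_this))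
--         if (CompName1 == 'Col') or ('seat' in CompName1.lower()): # if CompName1 is a primary component
--             num_allDS_this = 4
--         else:
--             num_allDS_this = 2
--
--     # Creating a list with multiple tuples (totals # of simu), each tuple counts how many components fall in a specific DS.
--     # Structure -  count_DS_Col = [ ( # of columns fall in DS0,  # of columns fall in DS1, ... # of columns fall in DS4), (counts of the 2nd MCS),...]
--         count_DS_this = []
--         for DSSample_perrlz_tuple in DamageSample_perrlz_this:
--             DStag_counts = Counter(DSSample_perrlz_tuple)
--             count_DS_this_rlz = tuple(DStag_counts.get(ds,0) for ds in range(num_allDS_this+1)) # Ensuring that each possible damage state is represented, even if its count is 0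
--             count_DS_this.append(count_DS_this_rlz)
--
--         CountDamagedQty[CompName1] = count_DS_this
--
--     return CountDamagedQty
-- ===== SOURCE B (Python) =====
-- from collections import Counter
--
-- def formalize_CountDamagedQty(CompName_List_input, DamageSample_Comp_Qty_input):
--     # Build ONE flat index per component: a Counter keyed by (realization, ds)
--     # pairs over all qty rows at once, then read the per-realization count
--     # tuples off that index -- no transpose, no per-column Counter.
--     CountDamagedQty = {}
--     for CompName1 in dict.fromkeys(CompName_List_input):
--         rows = DamageSample_Comp_Qty_input[CompName1]
--         num_allDS = 4 if (CompName1 == 'Col' or 'seat' in CompName1.lower()) else 2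
--         R = min((len(r) for r in rows), default=0)
--         cnt = Counter((j, ds) for row in rows for j, ds in enumerate(row[:R]))
--         CountDamagedQty[CompName1] = [
--             tuple(cnt[(j, ds)] for ds in range(num_allDS + 1)) for j in range(R)
--         ]
--     return CountDamagedQty
-- ===== Notes on version B (the rewrite author's own statement) =====
-- stated objective: alternative
-- what changed: B drops the zip(*rows) transpose and the per-column Counters: per component it builds one flat Counter keyed by (realization, ds) pairs over all qty rows in a single pass, then reads the whole count table off that index with two range comprehensions.
import Mathlib
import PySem

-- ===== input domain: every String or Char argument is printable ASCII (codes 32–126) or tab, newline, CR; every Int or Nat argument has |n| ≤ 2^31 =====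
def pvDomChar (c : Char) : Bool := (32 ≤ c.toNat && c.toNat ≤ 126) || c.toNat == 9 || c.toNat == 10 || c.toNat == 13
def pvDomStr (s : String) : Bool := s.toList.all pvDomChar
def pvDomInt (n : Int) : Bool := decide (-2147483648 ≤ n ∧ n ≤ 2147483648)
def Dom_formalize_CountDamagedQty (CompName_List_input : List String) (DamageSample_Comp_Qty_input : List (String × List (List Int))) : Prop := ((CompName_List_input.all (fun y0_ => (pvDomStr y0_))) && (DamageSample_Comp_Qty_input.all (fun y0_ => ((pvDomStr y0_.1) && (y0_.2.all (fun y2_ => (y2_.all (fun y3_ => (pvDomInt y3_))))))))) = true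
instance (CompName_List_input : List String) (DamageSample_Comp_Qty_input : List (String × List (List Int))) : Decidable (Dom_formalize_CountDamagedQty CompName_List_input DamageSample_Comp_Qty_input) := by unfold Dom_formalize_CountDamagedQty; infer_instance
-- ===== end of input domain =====

-- B replaces A's zip(*rows) transpose + per-column Counters by ONE flat Counter keyed by
-- (realization, ds) pairs, built in a single pass over the qty rows (objective: alternative).
-- ===== PORT A =====

-- `list(zip(*rows))`: for nonempty `rows` the columns `j = 0 .. min(len)-1`; exact, since
-- for `j` below every row's length `row.getD j 0` is Python's `row[j]`.
def pyZipStarA (rows : List (List Int)) : List (List Int) :=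
  match rows with
  | [] => []
  | r0 :: rest =>
    let R := rest.foldl (fun m r => min m r.length) r0.length
    (List.range R).map (fun j => (r0 :: rest).map (fun r => r.getD j 0))

-- `tuple(Counter(col).get(ds, 0) for ds in range(k+1))`
def countRowA (col : List Int) (k : Nat) : List Int :=
  (List.range (k + 1)).map (fun ds => (PySem.Dict.counter col).getD ((ds : Nat) : Int) 0)

def formalize_CountDamagedQty (CompName_List_input : List String) (DamageSample_Comp_Qty_input : List (String × List (List Int))) : List (String × List (List Int)) :=
  -- `{n: None for n in names}` then looping over its keys = ordered dedup of the names
  (PySem.List.dedup CompName_List_input).map (fun CompName1 =>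
    -- dict lookup (first match); a missing key is a KeyError, excluded by Pre_
    let rows := (List.lookup CompName1 DamageSample_Comp_Qty_input).getD []
    let num_allDS : Nat := if CompName1 == "Col" || PySem.Str.isIn "seat" (PySem.Str.lower CompName1) then 4 else 2
    (CompName1, (pyZipStarA rows).map (fun col => countRowA col num_allDS)))

-- ===== PORT B =====
def formalize_CountDamagedQty_alt (CompName_List_input : List String) (DamageSample_Comp_Qty_input : List (String × List (List Int))) : List (String × List (List Int)) :=
  -- `for name in dict.fromkeys(names)` = ordered dedup
  (PySem.List.dedup CompName_List_input).map (fun CompName1 =>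
    let rows := (List.lookup CompName1 DamageSample_Comp_Qty_input).getD []
    let num_allDS : Nat := if CompName1 == "Col" || PySem.Str.isIn "seat" (PySem.Str.lower CompName1) then 4 else 2
    -- `min((len(r) for r in rows), default=0)`
    let R : Nat := match rows with
      | [] => 0
      | r0 :: rest => rest.foldl (fun m r => min m r.length) r0.length
    -- `Counter((j, ds) for row in rows for j, ds in enumerate(row[:R]))`
    let cnt := PySem.Dict.counter (rows.flatMap (fun row => PySem.List.enumerate (row.take R)))
    (CompName1, (List.range R).map (fun j =>
      (List.range (num_allDS + 1)).map (fun ds => cnt.getD ((j : Nat), ((ds : Nat) : Int)) 0))))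

-- ===== PRECONDITION & SPEC =====
-- Pre_ excludes exactly the inputs on which Python A raises KeyError: a component name
-- that is not a key of the damage-sample dict (B raises there too).
def Pre_formalize_CountDamagedQty (CompName_List_input : List String) (DamageSample_Comp_Qty_input : List (String × List (List Int))) : Prop :=
  ∀ n ∈ CompName_List_input, ∃ p ∈ DamageSample_Comp_Qty_input, p.1 = n
instance (CompName_List_input : List String) (DamageSample_Comp_Qty_input : List (String × List (List Int))) : Decidable (Pre_formalize_CountDamagedQty CompName_List_input DamageSample_Comp_Qty_input) := by unfold Pre_formalize_CountDamagedQty; infer_instance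

def pvWitness_formalize_CountDamagedQty : List String × (List (String × List (List Int))) :=
  (["Col", "x"], [("Col", [[0, 1, 7], [2, 2]]), ("x", [[1, 0]])])

def Spec_formalize_CountDamagedQty (CompName_List_input : List String) (DamageSample_Comp_Qty_input : List (String × List (List Int))) (out : List (String × List (List Int))) : Prop := out = formalize_CountDamagedQty_alt CompName_List_input DamageSample_Comp_Qty_input
instance (CompName_List_input : List String) (DamageSample_Comp_Qty_input : List (String × List (List Int))) (out : List (String × List (List Int))) : Decidable (Spec_formalize_CountDamagedQty CompName_List_input DamageSample_Comp_Qty_input out) := by unfold Spec_formalize_CountDamagedQty; infer_instance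

-- ===== CLAIM =====
def Claim_equal_formalize_CountDamagedQty : Prop := ∀ (CompName_List_input : List String) (DamageSample_Comp_Qty_input : List (String × List (List Int))), Dom_formalize_CountDamagedQty CompName_List_input DamageSample_Comp_Qty_input → Pre_formalize_CountDamagedQty CompName_List_input DamageSample_Comp_Qty_input → Spec_formalize_CountDamagedQty CompName_List_input DamageSample_Comp_Qty_input (formalize_CountDamagedQty CompName_List_input DamageSample_Comp_Qty_input)

-- ===== LEMMAS AND PROOFS =====

-- the fold-of-min is below its seed and every element's length
theorem foldl_min_le (rest : List (List Int)) (init : Nat) :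
    rest.foldl (fun m r => min m r.length) init ≤ init ∧
    ∀ r ∈ rest, rest.foldl (fun m r => min m r.length) init ≤ r.length := by
  induction rest generalizing init with
  | nil => simp
  | cons a as ih =>
    simp only [List.foldl_cons, List.mem_cons]
    refine ⟨le_trans (ih (min init a.length)).1 (by omega), ?_⟩
    rintro r (rfl | hr)
    · exact le_trans (ih (min init r.length)).1 (by omega)
    · exact (ih (min init a.length)).2 r hr

-- counting one pair in the enumeration of a truncated row
theorem enum_count (r : List Int) (R jn : Nat) (ds : Int)
    (hlen : R ≤ r.length) (hj : jn < R) :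
    (PySem.List.enumerate (r.take R)).count (((jn : Nat) : Int), ds)
      = if r.getD jn 0 = ds then 1 else 0 := by
  have hnd : (PySem.List.enumerate (r.take R) 0).Nodup :=
    (PySem.List.pairwise_lt_enumerate _ _).imp (by intro p q h; exact fun e => by simp [e] at h)
  have hjr : jn < r.length := by omega
  have hjn : jn < (r.take R).length := by simp; omega
  have hget : r.getD jn 0 = r[jn] := List.getD_eq_getElem r 0 hjr
  by_cases hds : r.getD jn 0 = ds
  · rw [if_pos hds]
    have hmem : (((jn : Nat) : Int), ds) ∈ PySem.List.enumerate (r.take R) 0 := by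
      rw [PySem.List.mem_enumerate_iff]
      refine ⟨jn, hjn, ?_⟩
      have hgv : (r.take R)[jn] = r[jn] := List.getElem_take
      rw [Prod.mk.injEq]
      refine ⟨by simp, ?_⟩
      rw [hgv, ← hget, hds]
    exact List.count_eq_one_of_mem hnd hmem
  · rw [if_neg hds, List.count_eq_zero]
    intro hmem
    rw [PySem.List.mem_enumerate_iff] at hmem
    obtain ⟨k, hk, he⟩ := hmem
    have hkj : k = jn := by
      have := congrArg Prod.fst he
      simpa using this.symm
    subst hkj
    apply hds
    have h2 := congrArg Prod.snd he
    have hgv : (r.take R)[k] = r[k] := List.getElem_take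
    simp [hgv] at h2
    rw [hget]
    exact h2.symm

-- the flat pair-count over all rows equals the per-column count
theorem flat_count (rows : List (List Int)) (R jn : Nat) (ds : Int)
    (hR : ∀ r ∈ rows, R ≤ r.length) (hj : jn < R) :
    (rows.flatMap (fun row => PySem.List.enumerate (row.take R))).count (((jn : Nat) : Int), ds)
      = (rows.map (fun r => r.getD jn 0)).count ds := by
  induction rows with
  | nil => simp
  | cons r rs ih =>
    simp only [List.flatMap_cons, List.map_cons, List.count_append, List.count_cons, beq_iff_eq]
    rw [enum_count r R jn ds (hR r (by simp)) hj, ih (fun x hx => hR x (by simp [hx]))]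
    exact Nat.add_comm _ _

-- ===== VERDICT =====
theorem formalize_CountDamagedQty_spec : Claim_equal_formalize_CountDamagedQty := by
  intro names data _ _
  show _ = _
  unfold formalize_CountDamagedQty formalize_CountDamagedQty_alt
  apply List.map_congr_left
  intro name _
  simp only [Prod.mk.injEq, true_and]
  set rows := (List.lookup name data).getD [] with hrows
  match hrows' : rows with
  | [] => simp [pyZipStarA]
  | r0 :: rest =>
    simp only [pyZipStarA, List.map_map]
    apply List.map_congr_left
    intro j hjmem
    have hj : j < rest.foldl (fun m r => min m r.length) r0.length := List.mem_range.mp hjmem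
    have hR := foldl_min_le rest r0.length
    have hRall : ∀ r ∈ r0 :: rest, rest.foldl (fun m r => min m r.length) r0.length ≤ r.length := by
      intro r hr
      rcases List.mem_cons.mp hr with h | h
      · exact h ▸ hR.1
      · exact hR.2 r h
    simp only [Function.comp_def, countRowA]
    apply List.map_congr_left
    intro ds _
    rw [PySem.Dict.getD_counter, PySem.Dict.getD_counter]
    exact_mod_cast (flat_count (r0 :: rest) _ j ds hRall hj).symm
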